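-- pv_equiv track=rewrite | github.com/ajbmachon/wise_nutrition | wise_nutrition/cli/embed.py | _extract_content_from_dict
-- ===== SOURCE A (Python) =====
-- def _extract_content_from_dict(data: dict) -> str:
--     """
--     Extract content from a dictionary representation.
--
--     Rules:
--     1. Use 'content' field if available
--     2. Otherwise, concatenate available text fields
--     """
--     # If there's a 'content' field, use it
--     if 'content' in data:
--         return str(data['content'])
--
--     # Otherwise, try some common fields that might contain text
--     potential_content_fields = [
--         'description', 'text', 'body', 'summary', 'info',
--         'details', 'title', 'name', 'instructions'
--     ]
--
--     content_parts = []
--     for field in potential_content_fields: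
--         if field in data and data[field]:
--             if field in ['title', 'name']:
--                 content_parts.insert(0, f"{data[field]}\n")
--             else:
--                 content_parts.append(str(data[field]))
--
--     # If we found content fields, join them
--     if content_parts:
--         return "\n\n".join(content_parts)
--
--     # As a last resort, serialize the whole object
--     return str(data)
-- ===== SOURCE B (Python) =====
-- _RANK = {'name': 0, 'title': 1, 'description': 2, 'text': 3, 'body': 4,
--          'summary': 5, 'info': 6, 'details': 7, 'instructions': 8}
--
--
-- def _extract_content_from_dict(data: dict) -> str:
--     if 'content' in data:
--         return str(data['content'])
--     ranked = sorted(((_RANK[k], v) for k, v in data.items()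
--                      if k in _RANK and v), key=lambda t: t[0])
--     if not ranked:
--         return str(data)
--     return "\n\n".join(f"{v}\n" if r < 2 else str(v) for r, v in ranked)
-- ===== Notes on version B (the rewrite author's own statement) =====
-- stated objective: alternative
-- what changed: Instead of walking a fixed field list, looking each field up and prepending headers with insert(0), B makes one pass over the dict's own entries, tags each recognised truthy field with a numeric rank from a table (name=0, title=1, body fields 2..8), and sorts the tagged values by rank; unique dict keys make the rank-sorted list exactly A's field-order list.
import Mathlib
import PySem

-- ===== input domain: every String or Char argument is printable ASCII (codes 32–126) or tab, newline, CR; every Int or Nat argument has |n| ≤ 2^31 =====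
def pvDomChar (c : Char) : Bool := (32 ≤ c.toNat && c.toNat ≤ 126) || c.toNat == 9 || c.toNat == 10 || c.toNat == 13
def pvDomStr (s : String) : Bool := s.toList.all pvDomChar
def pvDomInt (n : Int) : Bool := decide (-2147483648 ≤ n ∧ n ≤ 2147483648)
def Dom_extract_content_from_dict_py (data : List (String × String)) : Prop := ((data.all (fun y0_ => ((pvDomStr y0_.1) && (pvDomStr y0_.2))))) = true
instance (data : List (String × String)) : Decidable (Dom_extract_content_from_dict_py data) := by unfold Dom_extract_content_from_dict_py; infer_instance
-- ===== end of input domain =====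

-- B takes a different route: instead of walking a fixed field list and looking each
-- field up (with an insert(0) trick for headers), it makes one pass over the dict's
-- own entries, tagging each recognised truthy field with a numeric rank from a table,
-- and sorts the tagged values by rank; correct because dict keys are unique, so the
-- rank-sorted list is exactly A's field-order list.
-- The association list denotes the Python dict built from it (duplicate keys
-- overwrite in place): both ports canonicalise with PySem.Dict.ofList first.

-- ===== PORT A =====

-- hand port of Python's repr of a str: exact for strings over Dom's character set
-- (printable ASCII plus tab, newline, CR)
def pyReprCharIn (q : Char) (c : Char) : List Char :=
  if c = '\\' then ['\\', '\\']
  else if c = q then ['\\', q]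
  else if c = '\n' then ['\\', 'n']
  else if c = '\r' then ['\\', 'r']
  else if c = '\t' then ['\\', 't']
  else [c]

def pyReprStr (s : String) : String :=
  let cs := s.toList
  let q : Char := if cs.contains '\'' && !cs.contains '"' then '"' else '\''
  String.ofList ([q] ++ (cs.flatMap (pyReprCharIn q)) ++ [q])

-- hand port of Python's str() of a dict[str, str]: "{'k': 'v', ...}" in insertion order
def pyReprDict (d : PySem.Dict String String) : String :=
  "{" ++ PySem.Str.join ", " (d.items.map (fun p => pyReprStr p.1 ++ ": " ++ pyReprStr p.2)) ++ "}"

def extract_content_from_dict_py (data : List (String × String)) : String :=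
  let d := PySem.Dict.ofList data
  if d.contains "content" then d.getD "content" ""
  else
    let potential_content_fields : List String :=
      ["description", "text", "body", "summary", "info",
       "details", "title", "name", "instructions"]
    let content_parts := potential_content_fields.foldl (fun content_parts field =>
      if d.contains field && (d.getD field "" != "") then
        if field == "title" || field == "name" then
          PySem.List.insert content_parts 0 (d.getD field "" ++ "\n")
        else
          content_parts ++ [d.getD field ""]
      else content_parts) []
    if content_parts ≠ [] then PySem.Str.join "\n\n" content_parts
    else pyReprDict d

-- ===== PORT B =====

-- the module-level _RANK table of Source B
def pvRANK : PySem.Dict String Int :=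
  PySem.Dict.ofList
    [("name", 0), ("title", 1), ("description", 2), ("text", 3), ("body", 4),
     ("summary", 5), ("info", 6), ("details", 7), ("instructions", 8)]

def extract_content_from_dict_py_alt (data : List (String × String)) : String :=
  let d := PySem.Dict.ofList data
  if d.contains "content" then d.getD "content" ""
  else
    let ranked := PySem.List.sorted
      (d.items.filterMap (fun p =>
        if pvRANK.contains p.1 && (p.2 != "") then some (pvRANK.getD p.1 0, p.2) else none))
      (fun t => t.1) false
    if ranked = [] then pyReprDict d
    else PySem.Str.join "\n\n" (ranked.map (fun t => if t.1 < 2 then t.2 ++ "\n" else t.2))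

-- ===== PRECONDITION & SPEC =====
def Spec_extract_content_from_dict_py (data : List (String × String)) (out : String) : Prop := out = extract_content_from_dict_py_alt data
instance (data : List (String × String)) (out : String) : Decidable (Spec_extract_content_from_dict_py data out) := by unfold Spec_extract_content_from_dict_py; infer_instance

-- ===== CLAIM (what is proved, stated in full; the proofs are below) =====
def Claim_equal_extract_content_from_dict_py : Prop := ∀ (data : List (String × String)), Dom_extract_content_from_dict_py data → Spec_extract_content_from_dict_py data (extract_content_from_dict_py data)

-- ===== LEMMAS AND PROOFS =====

-- proof-side: the fields with their ranks, in rank order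
def pvFieldRanks : List (String × Int) :=
  [("name", 0), ("title", 1), ("description", 2), ("text", 3), ("body", 4),
   ("summary", 5), ("info", 6), ("details", 7), ("instructions", 8)]

-- the ranked list named directly: fields in rank order, kept if present and truthy
def pvTarget (d : PySem.Dict String String) : List (Int × String) :=
  pvFieldRanks.filterMap (fun fr =>
    if d.contains fr.1 && (d.getD fr.1 "" != "") then some (fr.2, d.getD fr.1 "") else none)

theorem pvRANK_mk : pvRANK = PySem.Dict.mk pvFieldRanks := by decide

theorem pvRANK_mem (k : String) (h : pvRANK.contains k = true) :
    (k, pvRANK.getD k 0) ∈ pvFieldRanks := by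
  rw [pvRANK_mk, PySem.Dict.contains_mk] at h
  simp only [pvFieldRanks, List.any_cons, List.any_nil, Bool.or_eq_true, beq_iff_eq,
    Bool.false_eq_true, or_false] at h
  rcases h with h | h | h | h | h | h | h | h | h <;> subst h <;> decide

theorem pvRANK_of_mem (k : String) (r : Int) (h : (k, r) ∈ pvFieldRanks) :
    pvRANK.contains k = true ∧ pvRANK.getD k 0 = r := by
  fin_cases h <;> exact ⟨by decide, by decide⟩

theorem pvFieldRanks_rank_inj (a b : String) (r : Int)
    (ha : (a, r) ∈ pvFieldRanks) (hb : (b, r) ∈ pvFieldRanks) : a = b := by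
  simp only [pvFieldRanks, List.mem_cons, List.not_mem_nil, or_false, Prod.mk.injEq] at ha hb
  rcases ha with ⟨rfl, rfl⟩|⟨rfl, rfl⟩|⟨rfl, rfl⟩|⟨rfl, rfl⟩|⟨rfl, rfl⟩|⟨rfl, rfl⟩|⟨rfl, rfl⟩|⟨rfl, rfl⟩|⟨rfl, rfl⟩ <;> simp_all

-- the one-pass tagging of B's port, as a named function
def pvTag (p : String × String) : Option (Int × String) :=
  if pvRANK.contains p.1 && (p.2 != "") then some (pvRANK.getD p.1 0, p.2) else none

theorem pv_mem_iff (d : PySem.Dict String String) (hnd : d.keys.Nodup) (x : Int × String) :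
    x ∈ d.items.filterMap pvTag ↔ x ∈ pvTarget d := by
  rw [List.mem_filterMap]
  unfold pvTarget
  rw [List.mem_filterMap]
  constructor
  · rintro ⟨p, hp, hg⟩
    unfold pvTag at hg
    by_cases hc : (pvRANK.contains p.1 && (p.2 != "")) = true
    · rw [if_pos hc] at hg
      obtain ⟨hr, hv⟩ := Bool.and_eq_true_iff.mp hc
      have hget : d.get? p.1 = some p.2 :=
        (PySem.Dict.get?_eq_some_iff_mem_items d p.1 p.2 hnd).mpr (by exact hp)
      have hcont : d.contains p.1 = true := by
        rw [PySem.Dict.contains_eq_isSome_get?, hget]; rfl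
      have hgetD : d.getD p.1 "" = p.2 := PySem.Dict.getD_of_get?_eq_some d "" hget
      refine ⟨(p.1, pvRANK.getD p.1 0), pvRANK_mem p.1 hr, ?_⟩
      simp only [hcont, hgetD, hv, Bool.and_self, if_pos]
      rw [← hg]
    · rw [if_neg hc] at hg; cases hg
  · rintro ⟨fr, hfr, hg⟩
    by_cases hc : (d.contains fr.1 && (d.getD fr.1 "" != "")) = true
    · rw [if_pos hc] at hg
      obtain ⟨hcont, hv⟩ := Bool.and_eq_true_iff.mp hc
      have hsome : (d.get? fr.1).isSome := by
        rw [← PySem.Dict.contains_eq_isSome_get?]; exact hcont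
      obtain ⟨v, hget⟩ := Option.isSome_iff_exists.mp hsome
      have hgetD : d.getD fr.1 "" = v := PySem.Dict.getD_of_get?_eq_some d "" hget
      have hmem : (fr.1, v) ∈ d.items :=
        (PySem.Dict.get?_eq_some_iff_mem_items d fr.1 v hnd).mp hget
      obtain ⟨hrc, hrv⟩ := pvRANK_of_mem fr.1 fr.2 hfr
      refine ⟨(fr.1, v), hmem, ?_⟩
      unfold pvTag
      simp only [hrc, Bool.true_and]
      rw [hgetD] at hv
      simp only [hv, if_pos]
      rw [← hg, hrv, hgetD]
    · rw [if_neg hc] at hg; cases hg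

theorem pvTarget_pairwise (d : PySem.Dict String String) :
    (pvTarget d).Pairwise (fun a b => a.1 < b.1) := by
  unfold pvTarget
  have h0 : pvFieldRanks.Pairwise (fun a b => a.2 < b.2) := by decide
  refine List.pairwise_filterMap.mpr (h0.imp ?_)
  intro a a' hlt b hb b' hb'
  split_ifs at hb hb'
  all_goals try cases hb
  all_goals try cases hb'
  all_goals exact hlt

theorem pvTarget_nodup (d : PySem.Dict String String) : (pvTarget d).Nodup :=
  List.Pairwise.imp (fun h he => by rw [he] at h; exact lt_irrefl _ h) (pvTarget_pairwise d)

theorem pv_filterMap_nodup (d : PySem.Dict String String) (hnd : d.keys.Nodup) :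
    (d.items.filterMap pvTag).Nodup := by
  have hitems : d.items.Nodup :=
    List.Nodup.of_map (fun x => x.1) (show (d.items.map (fun x => x.1)).Nodup from hnd)
  refine List.Nodup.filterMap ?_ hitems
  intro a a' b hb hb'
  unfold pvTag at hb hb'
  split_ifs at hb hb' with h1 h2
  · obtain ⟨hr1, -⟩ := Bool.and_eq_true_iff.mp h1
    obtain ⟨hr2, -⟩ := Bool.and_eq_true_iff.mp h2
    have h3 := Option.mem_some_iff.mp hb
    have h4 := Option.mem_some_iff.mp hb'
    have h5 : (pvRANK.getD a.1 0, a.2) = (pvRANK.getD a'.1 0, a'.2) := h3.trans h4.symm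
    obtain ⟨he1, he2⟩ := Prod.mk.injEq _ _ _ _ ▸ h5
    have hkey := pvFieldRanks_rank_inj a.1 a'.1 (pvRANK.getD a.1 0)
      (pvRANK_mem a.1 hr1) (he1 ▸ pvRANK_mem a'.1 hr2)
    exact Prod.ext hkey he2
  · cases hb'
  · cases hb
  · cases hb

theorem pv_sorted_eq_target (d : PySem.Dict String String) (hnd : d.keys.Nodup) :
    PySem.List.sorted
      (d.items.filterMap (fun p =>
        if pvRANK.contains p.1 && (p.2 != "") then some (pvRANK.getD p.1 0, p.2) else none))
      (fun t => t.1) false = pvTarget d := by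
  show PySem.List.sorted (d.items.filterMap pvTag) (fun t => t.1) false = pvTarget d
  apply PySem.List.sorted_eq_of_perm_of_pairwise_lt
  · apply List.perm_of_nodup_nodup_toFinset_eq (pvTarget_nodup d) (pv_filterMap_nodup d hnd)
    apply Finset.ext
    intro x
    rw [List.mem_toFinset, List.mem_toFinset]
    exact (pv_mem_iff d hnd x).symm
  · exact pvTarget_pairwise d

-- ===== VERDICT (by name: the statement is the Claim_ definition above) =====
set_option maxHeartbeats 4000000 in
theorem extract_content_from_dict_py_spec : Claim_equal_extract_content_from_dict_py := by
  intro data _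
  unfold Spec_extract_content_from_dict_py extract_content_from_dict_py extract_content_from_dict_py_alt
  have hnd : (PySem.Dict.ofList data).keys.Nodup := PySem.Dict.nodup_keys_ofList data
  generalize hdd : PySem.Dict.ofList data = d at hnd ⊢
  by_cases hc : d.contains "content" = true
  · simp [hc]
  · simp only [Bool.not_eq_true] at hc
    simp only [hc, Bool.false_eq_true, if_false]
    rw [pv_sorted_eq_target d hnd]
    rcases Bool.eq_false_or_eq_true (d.contains "description" && (d.getD "description" "" != "")) with h1 | h1 <;>
    rcases Bool.eq_false_or_eq_true (d.contains "text" && (d.getD "text" "" != "")) with h2 | h2 <;>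
    rcases Bool.eq_false_or_eq_true (d.contains "body" && (d.getD "body" "" != "")) with h3 | h3 <;>
    rcases Bool.eq_false_or_eq_true (d.contains "summary" && (d.getD "summary" "" != "")) with h4 | h4 <;>
    rcases Bool.eq_false_or_eq_true (d.contains "info" && (d.getD "info" "" != "")) with h5 | h5 <;>
    rcases Bool.eq_false_or_eq_true (d.contains "details" && (d.getD "details" "" != "")) with h6 | h6 <;>
    rcases Bool.eq_false_or_eq_true (d.contains "title" && (d.getD "title" "" != "")) with h7 | h7 <;>
    rcases Bool.eq_false_or_eq_true (d.contains "name" && (d.getD "name" "" != "")) with h8 | h8 <;>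
    rcases Bool.eq_false_or_eq_true (d.contains "instructions" && (d.getD "instructions" "" != "")) with h9 | h9 <;>
    simp only [pvTarget, pvFieldRanks, List.filterMap_cons, List.filterMap_nil,
      List.foldl_cons, List.foldl_nil, h1, h2, h3, h4, h5, h6, h7, h8, h9,
      Bool.false_eq_true, if_false, if_true, PySem.List.insert_zero,
      List.map_cons, List.map_nil, String.reduceBEq, Bool.or_true,
      Bool.or_false, Int.reduceLT, ne_eq, reduceCtorEq,
      not_false_iff, not_true, List.nil_append, List.cons_append]
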